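-- pv_equiv track=rewrite | github.com/Ander456/py_program | day15.py | bfs
-- ===== SOURCE A (Python) =====
-- def bfs(nums, s):
--     if len(nums) == 0:
--         return False
--     seen = set()
--     q = [s]
--     while len(q) > 0:
--         index = q.pop(0)
--         # base case也就是终止条件
--         if nums[index] == 0:
--             return True
--         for i in [-1, 1]: #因为可以选择左或者右
--             next = index + i * nums[index]
--             if next not in seen and next >= 0 and next < len(nums):
--                 q.append(next)
--                 seen.add(next)
--     return False
-- ===== SOURCE B (Python) =====
-- def bfs(nums, s):
--     if len(nums) == 0:
--         return False
--     n = len(nums)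
--     # backward fixed-point: can[i] == "index i can reach some zero cell"
--     can = [nums[i] == 0 for i in range(n)]
--     changed = True
--     while changed:
--         changed = False
--         for i in range(n):
--             if not can[i]:
--                 v = nums[i]
--                 for j in (i - v, i + v):
--                     if 0 <= j < n and can[j]:
--                         can[i] = True
--                         changed = True
--                         break
--     v = nums[s]
--     if v == 0:
--         return True
--     return any(0 <= j < n and can[j] for j in (s - v, s + v))
-- ===== Notes on version B (the rewrite author's own statement) =====
-- stated objective: alternative
-- what changed: Replaces A's forward BFS worklist (queue + seen set, early exit on first zero popped) by a backward dynamic-programming fixed point: a boolean table can[i] = 'index i can reach a zero' seeded at the zero cells and saturated by repeated sweeps over all indices, after which the answer is read off from the start cell and its two jump targets; correct because both compute the same reachability relation.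
import Mathlib
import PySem

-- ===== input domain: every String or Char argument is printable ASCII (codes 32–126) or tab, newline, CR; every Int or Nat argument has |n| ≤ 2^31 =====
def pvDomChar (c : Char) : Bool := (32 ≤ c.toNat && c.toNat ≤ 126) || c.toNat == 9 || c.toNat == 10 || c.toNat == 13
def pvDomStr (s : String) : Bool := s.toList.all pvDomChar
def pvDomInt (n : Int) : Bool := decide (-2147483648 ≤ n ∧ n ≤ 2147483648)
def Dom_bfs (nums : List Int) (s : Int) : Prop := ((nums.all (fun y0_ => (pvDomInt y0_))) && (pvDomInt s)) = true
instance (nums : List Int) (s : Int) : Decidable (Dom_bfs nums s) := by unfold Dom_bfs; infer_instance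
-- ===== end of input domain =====

-- B replaces A's forward BFS worklist by a backward dynamic-programming fixed point
-- (a table can[i] = "i can reach a zero", saturated by sweeps), then reads the answer off
-- the start cell and its two jump targets; the boolean agrees because both compute reachability.

-- Number of in-range indices not yet in S: the termination measure of A's loop.
def pvMiss (nums : List Int) (S : List Int) : Nat :=
  ((List.range nums.length).filter (fun k : Nat => decide ((k : Int) ∉ S))).length

theorem pvFilterLenLe {α : Type} (l : List α) (p q : α → Bool)
    (h : ∀ a ∈ l, p a = true → q a = true) :
    (l.filter p).length ≤ (l.filter q).length := by
  induction l with
  | nil => simp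
  | cons b l ih =>
    have hl := ih (fun a ha => h a (List.mem_cons_of_mem _ ha))
    by_cases hb : p b = true
    · simp [hb, h b (List.mem_cons_self) hb]; omega
    · simp only [List.filter_cons, Bool.not_eq_true] at *
      rw [hb]
      cases hq : q b <;> simp <;> omega

theorem pvFilterLenLt {α : Type} (l : List α) (p q : α → Bool)
    (h : ∀ a ∈ l, p a = true → q a = true) (a : α) (ha : a ∈ l)
    (hq : q a = true) (hp : ¬ p a = true) :
    (l.filter p).length < (l.filter q).length := by
  induction l with
  | nil => simp at ha
  | cons b l ih =>
    have hle := pvFilterLenLe l p q (fun a ha => h a (List.mem_cons_of_mem _ ha))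
    rcases List.mem_cons.mp ha with rfl | ha'
    · have hfa : p a = false := by simpa using hp
      simp [List.filter_cons, hfa, hq]; omega
    · have hlt := ih (fun a ha => h a (List.mem_cons_of_mem _ ha)) ha'
      by_cases hb : p b = true
      · simp [hb, h b (List.mem_cons_self) hb]; omega
      · simp only [List.filter_cons, Bool.not_eq_true] at hb ⊢
        rw [hb]
        cases hqb : q b <;> simp <;> omega

theorem pvMiss_append_le (nums S t : List Int) : pvMiss nums (S ++ t) ≤ pvMiss nums S := by
  unfold pvMiss
  refine pvFilterLenLe _ _ _ (fun a _ hpa => ?_)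
  simp only [decide_eq_true_eq, List.mem_append] at *
  exact fun h => hpa (Or.inl h)

theorem pvMiss_append_lt (nums S t : List Int) (a : Int) (hat : a ∈ t) (haS : a ∉ S)
    (h0 : 0 ≤ a) (h1 : a < (nums.length : Int)) :
    pvMiss nums (S ++ t) < pvMiss nums S := by
  unfold pvMiss
  refine pvFilterLenLt _ _ _ (fun b _ hpb => ?_) a.toNat ?_ ?_ ?_
  · simp only [decide_eq_true_eq, List.mem_append] at *
    exact fun h => hpb (Or.inl h)
  · rw [List.mem_range]; omega
  · simp only [decide_eq_true_eq]
    rwa [Int.toNat_of_nonneg h0]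
  · simp only [decide_eq_true_eq, List.mem_append, not_not]
    rw [Int.toNat_of_nonneg h0]
    exact Or.inr hat

-- ===== PORT A =====
-- state (q, seen): append x to the queue and to seen if unseen and in range (one iteration of A's inner for-loop)
def pushA (nums : List Int) (x : Int) (st : List Int × List Int) : List Int × List Int :=
  if x ∉ st.2 ∧ 0 ≤ x ∧ x < (nums.length : Int) then (st.1 ++ [x], st.2 ++ [x]) else st

theorem pushA_eq_or (nums : List Int) (x : Int) (st : List Int × List Int) :
    pushA nums x st = st ∨
      (x ∉ st.2 ∧ 0 ≤ x ∧ x < (nums.length : Int) ∧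
        pushA nums x st = (st.1 ++ [x], st.2 ++ [x])) := by
  unfold pushA
  split_ifs with h
  · exact Or.inr ⟨h.1, h.2.1, h.2.2, rfl⟩
  · exact Or.inl rfl

def bfsLoop (nums : List Int) (q S : List Int) : Bool :=
  match q with
  | [] => false
  | index :: rest =>
    match PySem.List.pyGet? nums index with
    | none => false  -- Python raises IndexError here; excluded by Pre_bfs
    | some v =>
      if v = 0 then true
      else
        -- the for-loop over [-1, 1]: i = -1 first, then i = 1, seen updated in between
        bfsLoop nums (pushA nums (index + 1 * v) (pushA nums (index + (-1) * v) (rest, S))).1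
                     (pushA nums (index + 1 * v) (pushA nums (index + (-1) * v) (rest, S))).2
termination_by (pvMiss nums S, q.length)
decreasing_by
  rcases pushA_eq_or nums (index + (-1) * v) (rest, S) with hp1 | ⟨hpn1, hp01, hpl1, hp1⟩
  · rcases pushA_eq_or nums (index + 1 * v) (pushA nums (index + (-1) * v) (rest, S)) with
      hp2 | ⟨hpn2, hp02, hpl2, hp2⟩
    · rw [hp2, hp1]
      dsimp only
      exact Prod.Lex.right _ (by simp)
    · rw [hp1] at hpn2
      rw [hp2, hp1]
      dsimp only
      exact Prod.Lex.left _ _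
        (pvMiss_append_lt nums S [index + 1 * v] _ (by simp) hpn2 hp02 hpl2)
  · rcases pushA_eq_or nums (index + 1 * v) (pushA nums (index + (-1) * v) (rest, S)) with
      hp2 | ⟨hpn2, hp02, hpl2, hp2⟩
    · rw [hp2, hp1]
      dsimp only
      exact Prod.Lex.left _ _
        (pvMiss_append_lt nums S [index + (-1) * v] _ (by simp) hpn1 hp01 hpl1)
    · rw [hp2, hp1]
      dsimp only
      exact Prod.Lex.left _ _
        (lt_of_le_of_lt (pvMiss_append_le nums (S ++ [index + (-1) * v]) [index + 1 * v])
          (pvMiss_append_lt nums S [index + (-1) * v] _ (by simp) hpn1 hp01 hpl1))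

def bfs (nums : List Int) (s : Int) : Bool :=
  if nums.length = 0 then false
  else bfsLoop nums [s] []

-- ===== PORT B =====
-- one index i of the sweep `for i in range(n)` of Source B; state = (can, changed);
-- v = nums[i] is ported as nums.getD i 0, exact because the sweep has 0 <= i < len(nums)
def stepC (nums : List Int) (st : List Bool × Bool) (i : Nat) : List Bool × Bool :=
  if st.1.getD i false then st
  else
    -- for j in (i - v, i + v): first hit sets can[i] and breaks
    if 0 ≤ (i : Int) - nums.getD i 0 ∧ (i : Int) - nums.getD i 0 < (nums.length : Int) ∧
        st.1.getD ((i : Int) - nums.getD i 0).toNat false then (st.1.set i true, true)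
    else if 0 ≤ (i : Int) + nums.getD i 0 ∧ (i : Int) + nums.getD i 0 < (nums.length : Int) ∧
        st.1.getD ((i : Int) + nums.getD i 0).toNat false then (st.1.set i true, true)
    else st

-- one whole body of `while changed:`: changed = False, then the sweep
def passC (nums : List Int) (can : List Bool) : List Bool × Bool :=
  (List.range nums.length).foldl (stepC nums) (can, false)

-- `while changed:` — fuel (can.count false + 1 suffices) only makes the loop total;
-- each changed pass strictly shrinks the number of false entries, so the fuel is never exhausted
def satLoopF (nums : List Int) : Nat → List Bool → List Bool
  | 0, can => can
  | fuel + 1, can =>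
    match passC nums can with
    | (can', true) => satLoopF nums fuel can'
    | (can', false) => can'

def bfs_alt (nums : List Int) (s : Int) : Bool :=
  if nums.length = 0 then false
  else
    -- can = saturated table, seeded with [nums[i] == 0 for i in range(n)]
    let can := satLoopF nums (nums.length + 1)
      ((List.range nums.length).map (fun i => nums.getD i 0 == 0))
    match PySem.List.pyGet? nums s with
    | none => false  -- Python raises IndexError at nums[s]; excluded by Pre_bfs
    | some v =>
      if v = 0 then true
      else [s - v, s + v].any (fun j =>
        decide (0 ≤ j ∧ j < (nums.length : Int)) && can.getD j.toNat false)

-- ===== PRECONDITION & SPEC =====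
-- Pre_bfs excludes exactly the inputs on which A raises IndexError (nonempty nums with the
-- start index s outside Python's valid index range [-len(nums), len(nums))); B raises there too.
def Pre_bfs (nums : List Int) (s : Int) : Prop :=
  nums = [] ∨ (-(nums.length : Int) ≤ s ∧ s < (nums.length : Int))
instance (nums : List Int) (s : Int) : Decidable (Pre_bfs nums s) := by
  unfold Pre_bfs; infer_instance

def pvWitness_bfs : List Int × Int := ([2, 0, 1], 0)

def Spec_bfs (nums : List Int) (s : Int) (out : Bool) : Prop := out = bfs_alt nums s
instance (nums : List Int) (s : Int) (out : Bool) : Decidable (Spec_bfs nums s out) := by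
  unfold Spec_bfs; infer_instance

-- ===== CLAIM (what is proved, stated in full; the proofs are below) =====
def Claim_equal_bfs : Prop :=
  ∀ (nums : List Int) (s : Int), Dom_bfs nums s → Pre_bfs nums s → Spec_bfs nums s (bfs nums s)

-- ===== LEMMAS AND PROOFS =====

theorem stepC_eq_or (nums : List Int) (st : List Bool × Bool) (i : Nat) :
    stepC nums st i = st ∨
      (st.1.getD i false = false ∧ stepC nums st i = (st.1.set i true, true)) := by
  unfold stepC
  split_ifs with h1 h2 h3
  · exact Or.inl rfl
  · exact Or.inr ⟨by simpa using h1, rfl⟩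
  · exact Or.inr ⟨by simpa using h1, rfl⟩
  · exact Or.inl rfl

theorem count_false_set (l : List Bool) (i : Nat) (hi : i < l.length)
    (hf : l.getD i false = false) :
    (l.set i true).count false + 1 = l.count false := by
  induction l generalizing i with
  | nil => simp at hi
  | cons b l ih =>
    cases i with
    | zero =>
      simp only [List.getD_cons_zero] at hf
      subst hf
      simp [List.count_cons]
    | succ k =>
      simp only [List.length_cons, Nat.succ_lt_succ_iff] at hi
      simp only [List.getD_cons_succ] at hf
      have := ih k hi hf
      simp only [List.set_cons_succ, List.count_cons]
      omega

-- the sweep: length preserved, count of false never grows, and changed = true means it shrank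
theorem foldC_dec (nums : List Int) : ∀ (l : List Nat) (st : List Bool × Bool),
    (∀ i ∈ l, i < st.1.length) →
    (l.foldl (stepC nums) st).1.length = st.1.length ∧
    (l.foldl (stepC nums) st).1.count false ≤ st.1.count false ∧
    ((l.foldl (stepC nums) st).2 = true → st.2 = true ∨
      (l.foldl (stepC nums) st).1.count false < st.1.count false) := by
  intro l
  induction l with
  | nil => intro st _; exact ⟨rfl, le_refl _, fun h => Or.inl h⟩
  | cons i l ih =>
    intro st hl
    simp only [List.foldl_cons]
    rcases stepC_eq_or nums st i with heq | ⟨hf, heq⟩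
    · rw [heq]
      exact ih st (fun j hj => hl j (List.mem_cons_of_mem _ hj))
    · rw [heq]
      have hi : i < st.1.length := hl i List.mem_cons_self
      have hcnt := count_false_set st.1 i hi hf
      have hlen : (st.1.set i true).length = st.1.length := by simp
      rcases ih (st.1.set i true, true)
          (fun j hj => by rw [hlen]; exact hl j (List.mem_cons_of_mem _ hj)) with
        ⟨hL, hC, _⟩
      refine ⟨by rw [hL]; exact hlen, by dsimp at hC; omega, fun _ => Or.inr ?_⟩
      dsimp at hC
      omega


-- "there is a jump edge from x to the in-range index y"
def Edge (nums : List Int) (x y : Int) : Prop :=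
  ∃ v, PySem.List.pyGet? nums x = some v ∧ (y = x - v ∨ y = x + v) ∧
    0 ≤ y ∧ y < (nums.length : Int)

def zeroAt (nums : List Int) (y : Int) : Prop := PySem.List.pyGet? nums y = some 0

theorem pushA_ne (nums : List Int) (x : Int) (st : List Int × List Int)
    (hm : x ∉ st.2) (h0 : 0 ≤ x) (h1 : x < (nums.length : Int)) :
    pushA nums x st ≠ st := by
  unfold pushA
  rw [if_pos ⟨hm, h0, h1⟩]
  intro he
  have := congrArg (fun p => p.2.length) he
  simp at this

-- reachability from x avoiding S (every node strictly after the start lies outside S)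
inductive RA (nums : List Int) (S : List Int) : Int → Int → Prop
  | refl (x : Int) : RA nums S x x
  | tail {x y z : Int} : RA nums S x y → Edge nums y z → z ∉ S → RA nums S x z

theorem RA_mono {nums S S' : List Int} {x y : Int} (hss : ∀ z, z ∈ S → z ∈ S')
    (h : RA nums S' x y) : RA nums S x y := by
  induction h with
  | refl => exact RA.refl _
  | tail _ he hz ih => exact RA.tail ih he (fun h => hz (hss _ h))

theorem RA_trans {nums S : List Int} {x y z : Int}
    (h1 : RA nums S x y) (h2 : RA nums S y z) : RA nums S x z := by
  induction h2 with
  | refl => exact h1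
  | tail _ he hz ih => exact RA.tail ih he hz

theorem RA_shrink {nums S S' T : List Int} {x y : Int} (h : RA nums S x y)
    (hsub : ∀ z, z ∈ S → z ∈ S') (hT : ∀ z, z ∈ S' → z ∉ S → z ∈ T) (hx : x ∈ T) :
    ∃ x', x' ∈ T ∧ RA nums S' x' y := by
  induction h with
  | refl => exact ⟨x, hx, RA.refl _⟩
  | tail _ he hz ih =>
    rcases ih with ⟨x', hx', hra⟩
    rename_i y' z' _
    by_cases hz' : z' ∈ S'
    · exact ⟨z', hT z' hz' hz, RA.refl _⟩
    · exact ⟨x', hx', RA.tail hra he hz'⟩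

theorem RA_head {nums S : List Int} {x y : Int} (h : RA nums S x y) :
    x = y ∨ ∃ z, Edge nums x z ∧ z ∉ S ∧ RA nums S z y := by
  induction h with
  | refl => exact Or.inl rfl
  | tail _ he hz ih =>
    rcases ih with rfl | ⟨z, hez, hzS, hra⟩
    · exact Or.inr ⟨_, he, hz, RA.refl _⟩
    · exact Or.inr ⟨z, hez, hzS, RA_trans hra (RA.tail (RA.refl _) he hz)⟩

theorem valid_of_bounds {nums : List Int} {x : Int} (h0 : 0 ≤ x) (h1 : x < (nums.length : Int)) :
    ∃ v, PySem.List.pyGet? nums x = some v :=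
  ⟨nums[x.toNat]'(by omega), PySem.List.pyGet?_eq_some_getElem nums h0 h1⟩

theorem valid_of_pre {nums : List Int} {s : Int} (h0 : -(nums.length : Int) ≤ s)
    (h1 : s < (nums.length : Int)) : ∃ v, PySem.List.pyGet? nums s = some v := by
  cases hv : PySem.List.pyGet? nums s with
  | none => exact absurd ⟨h0, h1⟩ ((PySem.List.pyGet?_eq_none_iff nums s).mp hv)
  | some v => exact ⟨v, rfl⟩

-- the two sequential pushes of A's inner loop, characterized as "append adds to both components"
theorem pushA2_ex (nums : List Int) (index v : Int) (rest S : List Int)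
    (hv : PySem.List.pyGet? nums index = some v) :
    ∃ adds,
      pushA nums (index + 1 * v) (pushA nums (index + (-1) * v) (rest, S)) =
        (rest ++ adds, S ++ adds) ∧
      (∀ a ∈ adds, a ∉ S ∧ Edge nums index a) ∧
      (∀ y, Edge nums index y → y ∈ S ++ adds) := by
  have e1 : index + (-1) * v = index - v := by ring
  have e2 : index + 1 * v = index + v := by ring
  rcases pushA_eq_or nums (index + (-1) * v) (rest, S) with h1 | ⟨hn1, h01, hl1, h1⟩
  · rcases pushA_eq_or nums (index + 1 * v) (pushA nums (index + (-1) * v) (rest, S)) with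
      h2 | ⟨hn2, h02, hl2, h2⟩
    · rw [h2, h1]
      refine ⟨[], by simp, by simp, ?_⟩
      simp only [List.append_nil]
      rintro y ⟨v', hv', hy, h0y, hly⟩
      rw [hv] at hv'; injection hv' with hv'; subst hv'
      rw [h1] at h2
      rcases hy with rfl | rfl
      · by_contra hmem
        exact pushA_ne nums (index - v) (rest, S) hmem h0y hly (by rwa [e1] at h1)
      · by_contra hmem
        exact pushA_ne nums (index + v) (rest, S) hmem h0y hly (by rwa [e2] at h2)
    · rw [h1] at hn2
      rw [h2, h1]
      refine ⟨[index + 1 * v], by simp, ?_, ?_⟩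
      · intro a ha; simp only [List.mem_singleton] at ha; subst ha
        exact ⟨hn2, v, hv, Or.inr (by omega), h02, hl2⟩
      · rintro y ⟨v', hv', hy, h0y, hly⟩
        rw [hv] at hv'; injection hv' with hv'; subst hv'
        rcases hy with rfl | rfl
        · by_contra hmem
          simp only [List.mem_append, List.mem_singleton] at hmem
          push_neg at hmem
          exact pushA_ne nums (index - v) (rest, S) hmem.1 h0y hly (by rwa [e1] at h1)
        · exact List.mem_append.mpr (Or.inr (by simp only [List.mem_singleton]; omega))
  · rcases pushA_eq_or nums (index + 1 * v) (pushA nums (index + (-1) * v) (rest, S)) with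
      h2 | ⟨hn2, h02, hl2, h2⟩
    · rw [h2, h1]
      refine ⟨[index + (-1) * v], by simp, ?_, ?_⟩
      · intro a ha; simp only [List.mem_singleton] at ha; subst ha
        exact ⟨hn1, v, hv, Or.inl (by omega), h01, hl1⟩
      · rintro y ⟨v', hv', hy, h0y, hly⟩
        rw [hv] at hv'; injection hv' with hv'; subst hv'
        rcases hy with rfl | rfl
        · exact List.mem_append.mpr (Or.inr (by simp only [List.mem_singleton]; omega))
        · by_contra hmem
          exact pushA_ne nums (index + v)
            ((rest, S).1 ++ [index + (-1) * v], (rest, S).2 ++ [index + (-1) * v])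
            hmem h0y hly (by rw [← h1, ← e2]; exact h2)
    · rw [h1] at hn2
      rw [h2, h1]
      refine ⟨[index + (-1) * v, index + 1 * v], by simp, ?_, ?_⟩
      · intro a ha
        simp only [List.mem_append, List.mem_singleton] at hn2
        rcases List.mem_pair.mp ha with rfl | rfl
        · exact ⟨hn1, v, hv, Or.inl (by omega), h01, hl1⟩
        · exact ⟨fun h => hn2 (Or.inl h), v, hv, Or.inr (by omega), h02, hl2⟩
      · rintro y ⟨v', hv', hy, h0y, hly⟩
        rw [hv] at hv'; injection hv' with hv'; subst hv'
        rcases hy with rfl | rfl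
        · exact List.mem_append.mpr (Or.inr (by simp only [List.mem_pair]; omega))
        · exact List.mem_append.mpr (Or.inr (by simp only [List.mem_pair]; omega))

-- A's worklist loop finds a zero iff one is reachable (avoiding S) from some queued index.
theorem loopA_iff (nums : List Int) : ∀ (q S : List Int),
    (∀ x ∈ q, ∃ v, PySem.List.pyGet? nums x = some v) →
    (bfsLoop nums q S = true ↔ ∃ x ∈ q, ∃ y, RA nums S x y ∧ zeroAt nums y) := by
  intro q S
  induction q, S using bfsLoop.induct nums with
  | case1 S => simp [bfsLoop]
  | case2 S index rest hv =>
    intro hq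
    rcases hq index List.mem_cons_self with ⟨v, hv'⟩
    rw [hv] at hv'
    simp at hv'
  | case3 S index rest hv =>
    intro _
    rw [bfsLoop]
    simp only [hv, if_pos rfl]
    constructor
    · intro _
      exact ⟨index, List.mem_cons_self, index, RA.refl _, hv⟩
    · intro _; rfl
  | case4 S index rest v hv hv0 ih =>
    intro hq
    rcases pushA2_ex nums index v rest S hv with ⟨adds, hst, hfresh, hclose⟩
    have hq' : ∀ x ∈ (pushA nums (index + 1 * v) (pushA nums (index + (-1) * v) (rest, S))).1,
        ∃ w, PySem.List.pyGet? nums x = some w := by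
      rw [hst]
      intro x hx
      rcases List.mem_append.mp hx with hx | hx
      · exact hq x (List.mem_cons_of_mem _ hx)
      · rcases hfresh x hx with ⟨_, _, _, _, h0, h1⟩
        exact valid_of_bounds h0 h1
    rw [bfsLoop]
    simp only [hv, if_neg hv0]
    rw [ih hq', hst]
    dsimp only
    constructor
    · rintro ⟨x, hx, y, hra, hz⟩
      rcases List.mem_append.mp hx with hx | hx
      · exact ⟨x, List.mem_cons_of_mem _ hx,
          y, RA_mono (fun z hz => List.mem_append.mpr (Or.inl hz)) hra, hz⟩
      · rcases hfresh x hx with ⟨hxS, hex⟩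
        refine ⟨index, List.mem_cons_self, y, ?_, hz⟩
        exact RA_trans (RA.tail (RA.refl _) hex hxS)
          (RA_mono (fun z hz => List.mem_append.mpr (Or.inl hz)) hra)
    · rintro ⟨x, hx, y, hra, hz⟩
      rcases RA_shrink (S' := S ++ adds) (T := x :: adds) hra
          (fun z hz => List.mem_append.mpr (Or.inl hz))
          (fun z hz1 hz2 => by
            rcases List.mem_append.mp hz1 with h | h
            · exact absurd h hz2
            · exact List.mem_cons_of_mem _ h)
          List.mem_cons_self with ⟨x', hx', hra'⟩
      rcases List.mem_cons.mp hx' with heqx | hadds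
      · rcases List.mem_cons.mp hx with heqi | hrest
        · rcases RA_head hra' with heqy | ⟨z, hez, hzS, _⟩
          · rw [← heqy, heqx, heqi, zeroAt, hv] at hz
            injection hz with hz
            exact absurd hz hv0
          · rw [heqx, heqi] at hez
            exact absurd (hclose z hez) hzS
        · refine ⟨x', List.mem_append.mpr (Or.inl ?_), y, hra', hz⟩
          rw [heqx]; exact hrest
      · exact ⟨x', List.mem_append.mpr (Or.inr hadds), y, hra', hz⟩

theorem loopA_top (nums : List Int) (s : Int)
    (hs : ∃ v, PySem.List.pyGet? nums s = some v) :
    (bfsLoop nums [s] [] = true ↔ ∃ y, RA nums [] s y ∧ zeroAt nums y) := by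
  rw [loopA_iff nums [s] []
    (by rintro x hx; rcases List.mem_singleton.mp hx with rfl; exact hs)]
  simp

-- ===== B-side lemmas =====

-- "x can reach a zero cell"
def CanZ (nums : List Int) (x : Int) : Prop := ∃ y, RA nums [] x y ∧ zeroAt nums y

theorem CanZ_step {nums : List Int} {x j : Int} (he : Edge nums x j) (hj : CanZ nums j) :
    CanZ nums x := by
  rcases hj with ⟨y, hra, hz⟩
  exact ⟨y, RA_trans (RA.tail (RA.refl _) he (by simp)) hra, hz⟩

theorem pyGet?_natCast (nums : List Int) (i : Nat) (hi : i < nums.length) :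
    PySem.List.pyGet? nums (i : Int) = some (nums.getD i 0) := by
  rw [PySem.List.pyGet?_eq_some_getElem nums (by positivity) (by exact_mod_cast hi),
    List.getD_eq_getElem _ _ hi]
  simp

theorem getD_set_true (l : List Bool) (i k : Nat) (h : l.getD k false = true) :
    (l.set i true).getD k false = true := by
  induction l generalizing i k with
  | nil => simp at h
  | cons b l ih =>
    cases i with
    | zero => cases k <;> simp_all
    | succ i' => cases k <;> simp_all

theorem getD_set_ne (l : List Bool) (i k : Nat) (hne : k ≠ i) :
    (l.set i true).getD k false = l.getD k false := by
  unfold List.getD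
  rw [List.getElem?_set_ne (by omega)]

-- which branch fired when stepC changed the state
theorem stepC_fire (nums : List Int) (st : List Bool × Bool) (i : Nat)
    (hne : stepC nums st i ≠ st) :
    st.1.getD i false = false ∧ stepC nums st i = (st.1.set i true, true) ∧
    ∃ j, (j = (i : Int) - nums.getD i 0 ∨ j = (i : Int) + nums.getD i 0) ∧
      0 ≤ j ∧ j < (nums.length : Int) ∧ st.1.getD j.toNat false = true := by
  unfold stepC at hne ⊢
  split_ifs at hne ⊢ with h1 hc1 hc2
  · exact absurd rfl hne
  · exact ⟨by simpa using h1, rfl,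
      (i : Int) - nums.getD i 0, Or.inl rfl, hc1.1, hc1.2.1, hc1.2.2⟩
  · exact ⟨by simpa using h1, rfl,
      (i : Int) + nums.getD i 0, Or.inr rfl, hc2.1, hc2.2.1, hc2.2.2⟩
  · exact absurd rfl hne

-- soundness invariant: every true entry of can names an index that can reach a zero
def SoundInv (nums : List Int) (can : List Bool) : Prop :=
  ∀ i : Nat, i < nums.length → can.getD i false = true → CanZ nums (i : Int)

theorem stepC_sound (nums : List Int) (st : List Bool × Bool) (i : Nat)
    (hi : i < nums.length) (h : SoundInv nums st.1) : SoundInv nums (stepC nums st i).1 := by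
  by_cases hne : stepC nums st i = st
  · rw [hne]; exact h
  · rcases stepC_fire nums st i hne with ⟨hf, heq, j, hj, hj0, hjl, hjt⟩
    rw [heq]
    intro k hk hkt
    by_cases hki : k = i
    · subst hki
      have hjc : CanZ nums j := by
        have := h j.toNat (by omega) hjt
        rwa [Int.toNat_of_nonneg hj0] at this
      exact CanZ_step ⟨nums.getD k 0, pyGet?_natCast nums k hi, hj, hj0, hjl⟩ hjc
    · rw [getD_set_ne st.1 i k hki] at hkt
      exact h k hk hkt

theorem foldC_sound (nums : List Int) (l : List Nat) : ∀ (st : List Bool × Bool),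
    (∀ i ∈ l, i < nums.length) →
    SoundInv nums st.1 → SoundInv nums (l.foldl (stepC nums) st).1 := by
  induction l with
  | nil => intro st _ h; exact h
  | cons i l ih =>
    intro st hl h
    exact ih _ (fun j hj => hl j (List.mem_cons_of_mem _ hj))
      (stepC_sound nums st i (hl i List.mem_cons_self) h)

-- trues are never erased
theorem stepC_mono (nums : List Int) (st : List Bool × Bool) (i k : Nat)
    (h : st.1.getD k false = true) : (stepC nums st i).1.getD k false = true := by
  rcases stepC_eq_or nums st i with heq | ⟨_, heq⟩
  · rw [heq]; exact h
  · rw [heq]; exact getD_set_true st.1 i k h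

theorem foldC_mono (nums : List Int) (l : List Nat) : ∀ (st : List Bool × Bool) (k : Nat),
    st.1.getD k false = true → (l.foldl (stepC nums) st).1.getD k false = true := by
  induction l with
  | nil => intro st k h; exact h
  | cons i l ih => intro st k h; exact ih _ k (stepC_mono nums st i k h)

-- closedness of a false entry: none of its in-range jump targets is true
def ClosedAt (nums : List Int) (can : List Bool) (i : Nat) : Prop :=
  can.getD i false = false → ∀ j, Edge nums (i : Int) j → can.getD j.toNat false = false

theorem stepC_flag (nums : List Int) (st : List Bool × Bool) (i : Nat)
    (h : st.2 = true) : (stepC nums st i).2 = true := by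
  rcases stepC_eq_or nums st i with heq | ⟨_, heq⟩
  · rw [heq]; exact h
  · simp [heq]

theorem foldC_flag (nums : List Int) (l : List Nat) : ∀ (st : List Bool × Bool),
    st.2 = true → (l.foldl (stepC nums) st).2 = true := by
  induction l with
  | nil => intro st h; exact h
  | cons i l ih => intro st h; exact ih _ (stepC_flag nums st i h)

theorem stepC_fix (nums : List Int) (st : List Bool × Bool) (i : Nat)
    (hi : i < nums.length) (hfl : st.2 = false) (heq : stepC nums st i = st) :
    ClosedAt nums st.1 i := by
  intro hf j hej
  rcases hej with ⟨v, hv, hj, hj0, hjl⟩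
  rw [pyGet?_natCast nums i hi] at hv
  injection hv with hv
  subst hv
  unfold stepC at heq
  rw [if_neg (by rw [hf]; simp)] at heq
  by_contra hjt
  simp only [Bool.not_eq_false] at hjt
  split_ifs at heq with hc1 hc2
  · have := congrArg Prod.snd heq
    simp [hfl] at this
  · have := congrArg Prod.snd heq
    simp [hfl] at this
  · rcases hj with rfl | rfl
    · exact hc1 ⟨hj0, hjl, hjt⟩
    · exact hc2 ⟨hj0, hjl, hjt⟩

theorem foldC_fix (nums : List Int) (l : List Nat) : ∀ (st : List Bool × Bool),
    (∀ i ∈ l, i < nums.length) →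
    st.2 = false → (l.foldl (stepC nums) st).2 = false →
    (l.foldl (stepC nums) st).1 = st.1 ∧ ∀ i ∈ l, ClosedAt nums st.1 i := by
  induction l with
  | nil => intro st _ _ _; exact ⟨rfl, by simp⟩
  | cons i l ih =>
    intro st hl hfl hres
    simp only [List.foldl_cons] at hres ⊢
    by_cases hne : stepC nums st i = st
    · rcases ih st (fun j hj => hl j (List.mem_cons_of_mem _ hj)) hfl
        (by rwa [hne] at hres) with ⟨h1, h2⟩
      rw [hne]
      refine ⟨h1, fun k hk => ?_⟩
      rcases List.mem_cons.mp hk with rfl | hk'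
      · exact stepC_fix nums st k (hl k List.mem_cons_self) hfl hne
      · exact h2 k hk'
    · rcases stepC_fire nums st i hne with ⟨_, heq, _⟩
      rw [heq] at hres
      rw [foldC_flag nums l _ rfl] at hres
      exact absurd hres (by simp)

-- the saturation loop: sound, monotone over the seed, and closed at the end
theorem satLoopF_props (nums : List Int) : ∀ (fuel : Nat) (can : List Bool),
    can.length = nums.length → can.count false < fuel →
    (SoundInv nums can → SoundInv nums (satLoopF nums fuel can)) ∧
    (∀ k, can.getD k false = true → (satLoopF nums fuel can).getD k false = true) ∧
    (∀ i : Nat, i < nums.length → ClosedAt nums (satLoopF nums fuel can) i) := by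
  intro fuel
  induction fuel with
  | zero => intro can _ hcnt; omega
  | succ fuel ih =>
    intro can hlen hcnt
    rcases foldC_dec nums (List.range nums.length) (can, false)
        (fun i hi => by simpa [hlen] using List.mem_range.mp hi) with ⟨hL, hC, hFl⟩
    rw [satLoopF]
    cases hp : passC nums can with
    | mk can' changed =>
      have hp' : (List.range nums.length).foldl (stepC nums) (can, false) = (can', changed) := hp
      rw [hp'] at hL hC hFl
      cases changed with
      | true =>
        simp only [hp]
        dsimp only at hL hC hFl
        rcases hFl rfl with h | h
        · exact absurd h (by simp)
        · refine ⟨fun hs => (ih can' (by rw [hL, hlen]) (by omega)).1 ?_,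
            fun k hk => (ih can' (by rw [hL, hlen]) (by omega)).2.1 k ?_,
            (ih can' (by rw [hL, hlen]) (by omega)).2.2⟩
          · have := foldC_sound nums (List.range nums.length) (can, false)
              (fun i hi => List.mem_range.mp hi) hs
            rwa [hp'] at this
          · have := foldC_mono nums (List.range nums.length) (can, false) k hk
            rwa [hp'] at this
      | false =>
        simp only [hp]
        rcases foldC_fix nums (List.range nums.length) (can, false)
            (fun i hi => List.mem_range.mp hi) rfl (by rw [hp']) with ⟨h1, h2⟩
        rw [hp'] at h1
        dsimp only at h1
        subst h1
        exact ⟨fun hs => hs, fun k hk => hk, fun i hi => h2 i (List.mem_range.mpr hi)⟩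

-- a closed table absorbs every reachability path from a false entry
theorem closed_RA (nums : List Int) (r : List Bool)
    (hcl : ∀ i : Nat, i < nums.length → ClosedAt nums r i) :
    ∀ {x y : Int}, RA nums [] x y → 0 ≤ x → x < (nums.length : Int) →
      r.getD x.toNat false = false →
      r.getD y.toNat false = false ∧ 0 ≤ y ∧ y < (nums.length : Int) := by
  intro x y hra
  induction hra with
  | refl => intro h0 h1 hf; exact ⟨hf, h0, h1⟩
  | tail ra he hzmem ih =>
    rename_i y' z'
    intro h0 h1 hf
    rcases ih h0 h1 hf with ⟨hyf, hy0, hyl⟩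
    have hez : Edge nums ((y'.toNat : Nat) : Int) z' := by
      rwa [Int.toNat_of_nonneg hy0]
    have hz := hcl y'.toNat (by omega) hyf z' hez
    rcases he with ⟨_, _, _, hz0, hzl⟩
    exact ⟨hz, hz0, hzl⟩

-- the seed table marks exactly the zero cells (on in-range indices)
theorem seed_getD (nums : List Int) (i : Nat) (hi : i < nums.length) :
    ((List.range nums.length).map (fun k => nums.getD k 0 == 0)).getD i false =
      (nums.getD i 0 == 0) := by
  rw [List.getD_eq_getElem _ _ (by simpa using hi)]
  simp

theorem zeroAt_iff_getD (nums : List Int) (y : Int) (h0 : 0 ≤ y) (h1 : y < (nums.length : Int)) :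
    zeroAt nums y ↔ nums.getD y.toNat 0 = 0 := by
  rw [zeroAt, PySem.List.pyGet?_eq_some_getElem nums h0 h1,
    List.getD_eq_getElem _ _ (by omega)]
  simp

-- main B-side characterisation: the saturated table is exactly CanZ on in-range indices
theorem sat_iff (nums : List Int) (i : Nat) (hi : i < nums.length) :
    (satLoopF nums (nums.length + 1)
        ((List.range nums.length).map (fun k => nums.getD k 0 == 0))).getD i false = true ↔
      CanZ nums (i : Int) := by
  rcases satLoopF_props nums (nums.length + 1)
      ((List.range nums.length).map (fun k => nums.getD k 0 == 0)) (by simp)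
      (by have := List.count_le_length (l := (List.range nums.length).map
            (fun k => nums.getD k 0 == 0)) (a := false)
          simp only [List.length_map, List.length_range] at this
          omega) with ⟨hsound, hmono, hclosed⟩
  constructor
  · refine fun ht => hsound ?_ i hi ht
    intro k hk hkt
    rw [seed_getD nums k hk] at hkt
    exact ⟨(k : Int), RA.refl _,
      (zeroAt_iff_getD nums (k : Int) (by positivity) (by exact_mod_cast hk)).mpr
        (by simpa using hkt)⟩
  · rintro ⟨y, hra, hz⟩
    by_contra hf
    simp only [Bool.not_eq_true] at hf
    rcases closed_RA nums _ hclosed hra (by positivity) (by exact_mod_cast hi)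
        (by simpa using hf) with ⟨hyf, hy0, hyl⟩
    have := hmono y.toNat (by
      rw [seed_getD nums y.toNat (by omega)]
      simpa using (zeroAt_iff_getD nums y hy0 hyl).mp hz)
    rw [this] at hyf
    exact absurd hyf (by simp)

-- the whole of B, characterised through CanZ
theorem altB_iff (nums : List Int) (s : Int) (v : Int)
    (hlen : ¬ nums.length = 0) (hv : PySem.List.pyGet? nums s = some v) :
    (bfs_alt nums s = true ↔ CanZ nums s) := by
  rw [bfs_alt, if_neg hlen]
  simp only [hv]
  by_cases hv0 : v = 0
  · rw [if_pos hv0]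
    subst hv0
    simp only [true_iff]
    exact ⟨s, RA.refl _, hv⟩
  · rw [if_neg hv0, List.any_eq_true]
    constructor
    · rintro ⟨j, hj, hjt⟩
      rw [Bool.and_eq_true, decide_eq_true_eq] at hjt
      rcases hjt with ⟨⟨hj0, hjl⟩, hjt⟩
      have hjc : CanZ nums j := by
        have := (sat_iff nums j.toNat (by omega)).mp hjt
        rwa [Int.toNat_of_nonneg hj0] at this
      rcases List.mem_pair.mp hj with rfl | rfl
      · exact CanZ_step ⟨v, hv, Or.inl rfl, hj0, hjl⟩ hjc
      · exact CanZ_step ⟨v, hv, Or.inr rfl, hj0, hjl⟩ hjc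
    · rintro ⟨y, hra, hz⟩
      rcases RA_head hra with rfl | ⟨z, hez, _, hra'⟩
      · rw [zeroAt, hv] at hz
        injection hz with hz
        exact absurd hz hv0
      · rcases hez with ⟨v', hv', hzj, hz0, hzl⟩
        rw [hv] at hv'
        injection hv' with hv'
        subst hv'
        have hzt : (satLoopF nums (nums.length + 1)
            ((List.range nums.length).map (fun k => nums.getD k 0 == 0))).getD
              z.toNat false = true := by
          rw [sat_iff nums z.toNat (by omega), Int.toNat_of_nonneg hz0]
          exact ⟨y, hra', hz⟩
        refine ⟨z, by rcases hzj with rfl | rfl <;> simp, ?_⟩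
        rw [Bool.and_eq_true, decide_eq_true_eq]
        exact ⟨⟨hz0, hzl⟩, hzt⟩

-- ===== VERDICT (by name: the statement is the Claim_ definition above) =====
theorem bfs_spec : Claim_equal_bfs := by
  intro nums s _ hpre
  unfold Spec_bfs
  by_cases hlen : nums.length = 0
  · rw [bfs, bfs_alt, if_pos hlen, if_pos hlen]
  · have hs : -(nums.length : Int) ≤ s ∧ s < (nums.length : Int) := by
      rcases hpre with h | h
      · exact absurd (by rw [h]; rfl) hlen
      · exact h
    rcases valid_of_pre hs.1 hs.2 with ⟨v, hv⟩
    rw [bfs, if_neg hlen, Bool.eq_iff_iff, loopA_top nums s ⟨v, hv⟩]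
    exact (altB_iff nums s v hlen hv).symm
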